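-- pv_equiv track=rewrite | github.com/grrlkk/UKTA_v2 | backend/apps/cohesion/adjacent_overlap.py | adjacent_two_sentence_overlap_adverb_lemmas_normed
-- ===== SOURCE A (Python) =====
-- def is_adverb_lemma(pos_tag):
--     return "MAG" in pos_tag or "MAJ" in pos_tag
--
-- def adjacent_two_sentence_overlap_adverb_lemmas_normed(now, target1, target2):
--     lemma = set(item[1] for item in now if is_adverb_lemma(item[1]))
--     return (
--         1
--         if any(item[1] in lemma for item in target1)
--         and any(item[1] in lemma for item in target2)
--         else 0
--     )
-- ===== SOURCE B (Python) =====
-- def is_adverb_lemma(pos_tag):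
--     return "MAG" in pos_tag or "MAJ" in pos_tag
--
-- def adjacent_two_sentence_overlap_adverb_lemmas_normed(now, target1, target2):
--     t1 = {item[1] for item in target1}
--     t2 = {item[1] for item in target2}
--     hit1 = False
--     hit2 = False
--     for item in now:
--         lem = item[1]
--         if is_adverb_lemma(lem):
--             hit1 = hit1 or lem in t1
--             hit2 = hit2 or lem in t2
--             if hit1 and hit2:
--                 return 1
--     return 0
-- ===== Notes on version B (the rewrite author's own statement) =====
-- stated objective: alternative
-- what changed: Reverses the scan direction: instead of building the adverb-lemma set of `now` and scanning each target for a member, B precomputes the two target lemma sets and makes a single early-exiting pass over `now` with two hit flags, returning 1 as soon as some adverb lemma of `now` has been seen in each target.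
import Mathlib
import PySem

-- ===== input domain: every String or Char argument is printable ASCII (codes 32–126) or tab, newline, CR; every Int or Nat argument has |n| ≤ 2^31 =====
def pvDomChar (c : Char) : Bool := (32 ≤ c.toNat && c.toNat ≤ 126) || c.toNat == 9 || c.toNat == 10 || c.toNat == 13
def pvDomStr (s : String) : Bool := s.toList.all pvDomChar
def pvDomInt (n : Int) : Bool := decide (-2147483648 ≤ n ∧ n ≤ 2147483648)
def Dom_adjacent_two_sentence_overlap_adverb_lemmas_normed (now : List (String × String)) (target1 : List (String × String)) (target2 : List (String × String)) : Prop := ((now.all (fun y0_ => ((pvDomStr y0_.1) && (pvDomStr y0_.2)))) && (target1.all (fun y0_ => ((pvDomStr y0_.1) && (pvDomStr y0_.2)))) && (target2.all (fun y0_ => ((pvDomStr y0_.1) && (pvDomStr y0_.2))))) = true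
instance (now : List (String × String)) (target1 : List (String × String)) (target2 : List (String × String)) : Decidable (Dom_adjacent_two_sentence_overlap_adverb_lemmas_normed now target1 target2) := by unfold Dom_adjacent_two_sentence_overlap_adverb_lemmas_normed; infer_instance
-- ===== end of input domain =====

-- B reverses the scan direction: it precomputes the two target lemma sets and makes one early-exiting pass over `now` with two hit flags, instead of building the adverb-lemma set of `now` and scanning both targets (alternative; same cost).

-- ===== PORT A =====
def is_adverb_lemma (pos_tag : String) : Bool :=
  PySem.Str.isIn "MAG" pos_tag || PySem.Str.isIn "MAJ" pos_tag

def adjacent_two_sentence_overlap_adverb_lemmas_normed (now : List (String × String)) (target1 : List (String × String)) (target2 : List (String × String)) : Int :=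
  let lem : PySem.Set String :=
    PySem.Set.ofList ((now.filter (fun item => is_adverb_lemma item.2)).map (fun item => item.2))
  if (target1.any (fun item => PySem.Set.contains lem item.2))
      && (target2.any (fun item => PySem.Set.contains lem item.2)) then 1 else 0

-- ===== PORT B =====
-- the for-loop over `now` with flags hit1/hit2 and the early `return 1`
def pvAltLoop (t1 t2 : PySem.Set String) : List (String × String) → Bool → Bool → Int
  | [], _, _ => 0
  | item :: rest, hit1, hit2 =>
    if is_adverb_lemma item.2 then
      let hit1' := hit1 || PySem.Set.contains t1 item.2
      let hit2' := hit2 || PySem.Set.contains t2 item.2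
      if hit1' && hit2' then 1 else pvAltLoop t1 t2 rest hit1' hit2'
    else pvAltLoop t1 t2 rest hit1 hit2

def adjacent_two_sentence_overlap_adverb_lemmas_normed_alt (now : List (String × String)) (target1 : List (String × String)) (target2 : List (String × String)) : Int :=
  let t1 : PySem.Set String := PySem.Set.ofList (target1.map (fun item => item.2))
  let t2 : PySem.Set String := PySem.Set.ofList (target2.map (fun item => item.2))
  pvAltLoop t1 t2 now false false

-- ===== PRECONDITION & SPEC =====
def Spec_adjacent_two_sentence_overlap_adverb_lemmas_normed (now : List (String × String)) (target1 : List (String × String)) (target2 : List (String × String)) (out : Int) : Prop := out = adjacent_two_sentence_overlap_adverb_lemmas_normed_alt now target1 target2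
instance (now : List (String × String)) (target1 : List (String × String)) (target2 : List (String × String)) (out : Int) : Decidable (Spec_adjacent_two_sentence_overlap_adverb_lemmas_normed now target1 target2 out) := by unfold Spec_adjacent_two_sentence_overlap_adverb_lemmas_normed; infer_instance

-- ===== CLAIM =====
def Claim_equal_adjacent_two_sentence_overlap_adverb_lemmas_normed : Prop := ∀ (now : List (String × String)) (target1 : List (String × String)) (target2 : List (String × String)), Dom_adjacent_two_sentence_overlap_adverb_lemmas_normed now target1 target2 → Spec_adjacent_two_sentence_overlap_adverb_lemmas_normed now target1 target2 (adjacent_two_sentence_overlap_adverb_lemmas_normed now target1 target2)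

-- ===== LEMMAS AND PROOFS =====

-- Characterisation of B's loop: it returns 1 iff each flag is (or becomes) set by some adverb item of `now` whose lemma is in the corresponding target set.
lemma pvAltLoop_eq (t1 t2 : PySem.Set String) (now : List (String × String)) (h1 h2 : Bool)
    (hne : (h1 && h2) = false) :
    pvAltLoop t1 t2 now h1 h2 =
      if (h1 || now.any (fun it => is_adverb_lemma it.2 && PySem.Set.contains t1 it.2))
          && (h2 || now.any (fun it => is_adverb_lemma it.2 && PySem.Set.contains t2 it.2)) then 1 else 0 := by
  induction now generalizing h1 h2 with
  | nil => simp [pvAltLoop] at hne ⊢; tauto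
  | cons item rest ih =>
    simp only [pvAltLoop, List.any_cons]
    by_cases ha : is_adverb_lemma item.2
    · simp only [ha, if_true, Bool.true_and]
      by_cases hb : ((h1 || PySem.Set.contains t1 item.2) && (h2 || PySem.Set.contains t2 item.2)) = true
      · simp only [hb, if_true]
        rcases Bool.and_eq_true .. |>.mp hb with ⟨hb1, hb2⟩
        have : ∀ (h : Bool) (c : Bool) (r : Bool), (h || c) = true → (h || (c || r)) = true := by
          intro h c r hh; rcases Bool.or_eq_true _ _ |>.mp hh with h' | h' <;> simp [h']
        rw [if_pos]
        simp only [Bool.and_eq_true]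
        exact ⟨this _ _ _ hb1, this _ _ _ hb2⟩
      · simp only [hb, Bool.false_eq_true, if_false]
        rw [ih _ _ (Bool.not_eq_true _ |>.mp hb)]
        congr 1
        simp only [Bool.or_assoc]
    · simp only [ha, Bool.false_eq_true, if_false, Bool.false_and, Bool.false_or]
      exact ih h1 h2 hne

-- A's scan of a target agrees with "some adverb item of now has its lemma in the target's lemma set".
lemma scan_swap (now target : List (String × String)) :
    (target.any (fun item =>
        PySem.Set.contains
          (PySem.Set.ofList ((now.filter (fun it => is_adverb_lemma it.2)).map (fun it => it.2))) item.2))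
      = now.any (fun it => is_adverb_lemma it.2 &&
          PySem.Set.contains (PySem.Set.ofList (target.map (fun item => item.2))) it.2) := by
  rw [Bool.eq_iff_iff]
  simp only [List.any_eq_true, PySem.Set.contains_iff, PySem.Set.mem_ofList, List.mem_map,
    List.mem_filter, Bool.and_eq_true]
  constructor
  · rintro ⟨t, ht, it, ⟨hit, hadv⟩, heq⟩
    exact ⟨it, hit, hadv, t, ht, heq.symm⟩
  · rintro ⟨it, hit, hadv, t, ht, heq⟩
    exact ⟨t, ht, it, ⟨hit, hadv⟩, heq.symm⟩

-- ===== VERDICT =====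
theorem adjacent_two_sentence_overlap_adverb_lemmas_normed_spec : Claim_equal_adjacent_two_sentence_overlap_adverb_lemmas_normed := by
  intro now target1 target2 _
  unfold Spec_adjacent_two_sentence_overlap_adverb_lemmas_normed
  unfold adjacent_two_sentence_overlap_adverb_lemmas_normed adjacent_two_sentence_overlap_adverb_lemmas_normed_alt
  rw [pvAltLoop_eq _ _ now false false rfl]
  simp only [Bool.false_or, scan_swap]
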